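-- pv_equiv track=rewrite | github.com/cybersubomi/Yahtzee | yahtzee2.py | sum_of_given_number
-- ===== SOURCE A (Python) =====
-- def sum_of_given_number(roll: tuple, number: int) -> int:
--     """
--     Returns the sum of the values in the roll that match the given number.
--     Example: sum_of_given_number((2,6,2,6,1), 6) = 12
--     """
--     sum_of_given_number = 0
--     for digit in roll:
--         if number == digit:
--             sum_of_given_number += digit       #sum of all occurences of number in the dice_roll
--         else:
--             sum_of_given_number += 0
--
--     return sum_of_given_number
-- ===== SOURCE B (Python) =====
-- def sum_of_given_number(roll: tuple, number: int) -> int: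
--     """Returns the sum of the values in the roll that match the given number."""
--     return number * roll.count(number)
-- ===== Notes on version B (the rewrite author's own statement) =====
-- stated objective: idiomatic
-- what changed: Replaces the conditional-accumulation loop with count-then-multiply: number * roll.count(number).
import Mathlib
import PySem

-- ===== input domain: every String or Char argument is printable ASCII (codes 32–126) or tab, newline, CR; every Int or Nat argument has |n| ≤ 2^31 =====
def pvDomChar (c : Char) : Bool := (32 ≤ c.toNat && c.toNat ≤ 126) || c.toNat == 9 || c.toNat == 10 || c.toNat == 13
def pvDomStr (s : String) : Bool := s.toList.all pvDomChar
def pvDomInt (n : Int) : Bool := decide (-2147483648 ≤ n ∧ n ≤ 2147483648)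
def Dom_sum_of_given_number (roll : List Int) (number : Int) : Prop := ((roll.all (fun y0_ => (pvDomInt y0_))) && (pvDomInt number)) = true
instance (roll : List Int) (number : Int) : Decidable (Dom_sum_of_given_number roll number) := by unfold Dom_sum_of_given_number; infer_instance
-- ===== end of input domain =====

-- B: count-then-multiply (number * roll.count number) instead of a conditional accumulation loop; same results.
-- ===== PORT A =====
def sum_of_given_number (roll : List Int) (number : Int) : Int :=
  roll.foldl (fun acc digit => if number == digit then acc + digit else acc + 0) 0

-- ===== PORT B =====
def sum_of_given_number_alt (roll : List Int) (number : Int) : Int :=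
  number * PySem.List.count roll number

-- ===== PRECONDITION & SPEC =====
def Spec_sum_of_given_number (roll : List Int) (number : Int) (out : Int) : Prop := out = sum_of_given_number_alt roll number
instance (roll : List Int) (number : Int) (out : Int) : Decidable (Spec_sum_of_given_number roll number out) := by unfold Spec_sum_of_given_number; infer_instance

-- ===== CLAIM (what is proved, stated in full; the proofs are below) =====
def Claim_equal_sum_of_given_number : Prop := ∀ (roll : List Int) (number : Int), Dom_sum_of_given_number roll number → Spec_sum_of_given_number roll number (sum_of_given_number roll number)

-- ===== LEMMAS AND PROOFS =====

-- ===== VERDICT (by name: the statement is the Claim_ definition above) =====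
lemma sogn_loop (roll : List Int) (number acc : Int) :
    roll.foldl (fun acc digit => if number == digit then acc + digit else acc + 0) acc
      = acc + number * PySem.List.count roll number := by
  induction roll generalizing acc with
  | nil => simp [PySem.List.count]
  | cons h t ih =>
    by_cases hd : number = h
    · subst hd
      simp only [List.foldl_cons, beq_self_eq_true, if_true]
      rw [ih]
      simp [PySem.List.count]
      ring
    · have hb : (number == h) = false := by simp [hd]
      have hc : (h == number) = false := by simp [Ne.symm hd]
      simp only [List.foldl_cons, hb, Bool.false_eq_true, if_false]
      rw [ih]
      simp [PySem.List.count, List.count_cons, hc]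

theorem sum_of_given_number_spec : Claim_equal_sum_of_given_number := by
  intro roll number _
  unfold Spec_sum_of_given_number sum_of_given_number sum_of_given_number_alt
  simpa using sogn_loop roll number 0
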